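-- pv_equiv track=rewrite | github.com/krump3t/astra-graphrag | services/langgraph/workflow.py | _order_mnemonics
-- ===== SOURCE A (Python) =====
-- from typing import Callable, Dict, Any, Optional, List, Iterable
--
-- PRIMARY_MNEMONIC_ORDER = [
--     'DEPT',
--     'FORCE_2020_LITHOFACIES_LITHOLOGY',
--     'FORCE_2020_LITHOFACIES_CONFIDENCE',
--     'CALI',
--     'MUDWEIGHT',
--     'ROP',
--     'RHOB',
--     'GR',
--     'SGR',
--     'NPHI',
--     'DTC',
--     'DTS',
--     'DRHO',
--     'PEF',
--     'BS',
--     'DCAL',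
--     'RDEP',
--     'RMED',
--     'RSHA',
--     'RXO',
--     'SP',
-- ]
--
-- def _order_mnemonics(mnemonics: Iterable[str]) -> List[str]:
--     """Return mnemonics sorted by preferred order with deduplication."""
--     seen: List[str] = []
--     for raw in mnemonics:
--         if not isinstance(raw, str):
--             continue
--         value = raw.strip().upper()
--         if not value or value in seen:
--             continue
--         seen.append(value)
--
--     ordered: List[str] = []
--     for preferred in PRIMARY_MNEMONIC_ORDER:
--         if preferred in seen:
--             ordered.append(preferred)
--     remainder = [code for code in seen if code not in ordered]
--     remainder.sort()
--     ordered.extend(remainder)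
--     return ordered
-- ===== SOURCE B (Python) =====
-- from typing import List, Iterable
--
-- PRIMARY_MNEMONIC_ORDER = [
--     'DEPT',
--     'FORCE_2020_LITHOFACIES_LITHOLOGY',
--     'FORCE_2020_LITHOFACIES_CONFIDENCE',
--     'CALI',
--     'MUDWEIGHT',
--     'ROP',
--     'RHOB',
--     'GR',
--     'SGR',
--     'NPHI',
--     'DTC',
--     'DTS',
--     'DRHO',
--     'PEF',
--     'BS',
--     'DCAL',
--     'RDEP',
--     'RMED',
--     'RSHA',
--     'RXO',
--     'SP',
-- ]
--
-- def _order_mnemonics(mnemonics: Iterable[str]) -> List[str]: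
--     """Return mnemonics sorted by preferred order with deduplication.
--
--     Single keyed sort instead of A's two extra passes: preferred codes sort by
--     their position in PRIMARY_MNEMONIC_ORDER, everything else shares the
--     sentinel rank and ties break alphabetically.
--     """
--     seen: List[str] = []
--     for raw in mnemonics:
--         if not isinstance(raw, str):
--             continue
--         value = raw.strip().upper()
--         if not value or value in seen:
--             continue
--         seen.append(value)
--
--     n = len(PRIMARY_MNEMONIC_ORDER)
--     return sorted(
--         seen,
--         key=lambda c: (PRIMARY_MNEMONIC_ORDER.index(c) if c in PRIMARY_MNEMONIC_ORDER else n, c),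
--     )
-- ===== Notes on version B (the rewrite author's own statement) =====
-- stated objective: idiomatic
-- what changed: A's two extra passes (scan PRIMARY_MNEMONIC_ORDER for present codes, then filter-and-sort the remainder) are replaced by one standard keyed sort of the deduplicated list: key = (rank in the preferred list or the sentinel len(PRIMARY_MNEMONIC_ORDER), the code itself).
import Mathlib
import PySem

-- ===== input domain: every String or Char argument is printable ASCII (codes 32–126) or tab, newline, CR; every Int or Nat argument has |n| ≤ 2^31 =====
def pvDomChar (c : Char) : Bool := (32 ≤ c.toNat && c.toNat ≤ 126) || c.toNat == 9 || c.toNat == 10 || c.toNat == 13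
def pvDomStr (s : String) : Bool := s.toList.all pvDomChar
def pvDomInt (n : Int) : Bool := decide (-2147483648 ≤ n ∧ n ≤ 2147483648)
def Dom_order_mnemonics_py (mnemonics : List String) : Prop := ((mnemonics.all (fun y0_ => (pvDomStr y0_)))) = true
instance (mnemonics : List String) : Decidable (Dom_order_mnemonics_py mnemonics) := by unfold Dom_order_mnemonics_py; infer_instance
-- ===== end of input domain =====

-- B replaces A's two ordering passes (scan the preferred list, then sort the filtered remainder)
-- by one keyed sort of the deduplicated list: key = (rank in the preferred list or sentinel 21, the code itself).

-- PRIMARY_MNEMONIC_ORDER (module constant, shared by Source A and Source B)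
def pvPrimary : List String :=
  ["DEPT", "FORCE_2020_LITHOFACIES_LITHOLOGY", "FORCE_2020_LITHOFACIES_CONFIDENCE",
   "CALI", "MUDWEIGHT", "ROP", "RHOB", "GR", "SGR", "NPHI", "DTC", "DTS", "DRHO",
   "PEF", "BS", "DCAL", "RDEP", "RMED", "RSHA", "RXO", "SP"]

-- the normalisation/dedup loop, textually identical in Source A and Source B
-- (the `isinstance(raw, str)` guard is always true under the List String typing and vanishes)
def pvSeen (mnemonics : List String) : List String :=
  mnemonics.foldl (fun acc raw =>
    let value := PySem.Str.upper (PySem.Str.strip raw)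
    if value = "" ∨ value ∈ acc then acc else acc ++ [value]) []

-- ===== PORT A =====
def order_mnemonics_py (mnemonics : List String) : List String :=
  let seen := pvSeen mnemonics
  let ordered := pvPrimary.foldl (fun acc preferred =>
    if preferred ∈ seen then acc ++ [preferred] else acc) []
  let remainder := seen.filter (fun code => decide (code ∉ ordered))
  ordered ++ PySem.List.sorted remainder (fun x => x) false   -- remainder.sort(); ordered.extend(remainder)

-- ===== PORT B =====
-- Source B's key first component: PRIMARY_MNEMONIC_ORDER.index(c) if c in PRIMARY_MNEMONIC_ORDER else 21
-- (index? is some exactly when the membership test succeeds, so the match is that conditional)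
def pvRank (c : String) : Int :=
  match PySem.List.index? pvPrimary c with
  | some i => (i : Int)
  | none => 21

def order_mnemonics_py_alt (mnemonics : List String) : List String :=
  let seen := pvSeen mnemonics
  PySem.List.sorted2 seen pvRank (fun c => c) false   -- sorted(seen, key=lambda c: (rank(c), c))

-- ===== PRECONDITION & SPEC =====
def Spec_order_mnemonics_py (mnemonics : List String) (out : List String) : Prop := out = order_mnemonics_py_alt mnemonics
instance (mnemonics : List String) (out : List String) : Decidable (Spec_order_mnemonics_py mnemonics out) := by unfold Spec_order_mnemonics_py; infer_instance

-- ===== CLAIM (what is proved, stated in full; the proofs are below) =====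
def Claim_equal_order_mnemonics_py : Prop := ∀ (mnemonics : List String), Dom_order_mnemonics_py mnemonics → Spec_order_mnemonics_py mnemonics (order_mnemonics_py mnemonics)

-- ===== LEMMAS AND PROOFS =====

-- the dedup loop never inserts a duplicate
lemma pvSeen_nodup_aux (l acc : List String) (h : acc.Nodup) :
    (l.foldl (fun acc raw =>
      let value := PySem.Str.upper (PySem.Str.strip raw)
      if value = "" ∨ value ∈ acc then acc else acc ++ [value]) acc).Nodup := by
  induction l generalizing acc with
  | nil => exact h
  | cons x xs ih =>
    simp only [List.foldl_cons]
    split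
    · exact ih _ h
    · rename_i hc
      refine ih _ (h.append (List.nodup_singleton _) ?_)
      intro a ha hb
      rw [List.mem_singleton] at hb
      subst hb
      exact hc (Or.inr ha)

lemma pvSeen_nodup (mnemonics : List String) : (pvSeen mnemonics).Nodup :=
  pvSeen_nodup_aux mnemonics [] List.nodup_nil

lemma pvPrimary_pairwise : pvPrimary.Pairwise (fun a b => pvRank a < pvRank b) := by decide

lemma pvRank_lt_of_mem (a : String) (h : a ∈ pvPrimary) : pvRank a < 21 := by
  fin_cases h <;> decide

lemma pvRank_of_not_mem (a : String) (h : a ∉ pvPrimary) : pvRank a = 21 := by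
  unfold pvRank
  rw [(PySem.List.index?_eq_none_iff pvPrimary a).mpr h]

-- sorted2 with an (Int, String) key is `sorted` with the corresponding lexicographic key,
-- so any strictly key-increasing rearrangement names its value
lemma pvSorted2_eq_of_perm_of_pairwise_lt (xs ys : List String) (k1 : String → Int)
    (hperm : ys.Perm xs)
    (hpair : ys.Pairwise (fun a b => toLex (k1 a, a) < toLex (k1 b, b))) :
    PySem.List.sorted2 xs k1 (fun c => c) false = ys := by
  have hb : PySem.List.sorted2 xs k1 (fun c => c) false
      = PySem.List.sorted xs (fun x => toLex (k1 x, x)) false := by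
    simp only [PySem.List.sorted2, PySem.List.sorted]
    congr 1
    funext acc x
    congr 1
    funext a b
    rw [Bool.eq_iff_iff]
    simp only [Bool.false_eq_true, if_false, Bool.or_eq_true, Bool.and_eq_true,
      Bool.not_eq_true', decide_eq_true_eq, decide_eq_false_iff_not]
    rw [Prod.Lex.toLex_lt_toLex]
    dsimp only
    constructor
    · rintro (h | ⟨h, h2⟩)
      · exact Or.inl h
      · rcases lt_or_eq_of_le (not_lt.mp h) with h' | h'
        · exact Or.inl h'
        · exact Or.inr ⟨h', h2⟩
    · rintro (h | ⟨h, h2⟩)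
      · exact Or.inl h
      · exact Or.inr ⟨not_lt.mpr (le_of_eq h), h2⟩
  rw [hb]
  exact PySem.List.sorted_eq_of_perm_of_pairwise_lt xs ys _ hperm hpair

theorem order_mnemonics_py_spec : Claim_equal_order_mnemonics_py := by
  intro ms _
  unfold Spec_order_mnemonics_py order_mnemonics_py order_mnemonics_py_alt
  set S := pvSeen ms with hSdef
  have hSnodup : S.Nodup := pvSeen_nodup ms
  -- the preferred-scan loop is a filter of pvPrimary
  have hO : pvPrimary.foldl (fun acc preferred =>
      if preferred ∈ S then acc ++ [preferred] else acc) []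
      = pvPrimary.filter (fun p => decide (p ∈ S)) := by
    have := PySem.List.foldl_append_if (fun p => decide (p ∈ S)) id pvPrimary []
    simpa using this
  dsimp only
  rw [hO]
  set O := pvPrimary.filter (fun p => decide (p ∈ S)) with hOdef
  set R := S.filter (fun code => decide (code ∉ O)) with hRdef
  have hmemO : ∀ c, c ∈ O ↔ c ∈ pvPrimary ∧ c ∈ S := by
    intro c; simp [hOdef, List.mem_filter]
  have hmemR : ∀ c, c ∈ R ↔ c ∈ S ∧ c ∉ pvPrimary := by
    intro c
    simp only [hRdef, List.mem_filter, decide_eq_true_eq, hmemO]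
    constructor
    · rintro ⟨hc, hn⟩; exact ⟨hc, fun hp => hn ⟨hp, hc⟩⟩
    · rintro ⟨hc, hn⟩; exact ⟨hc, fun ⟨hp, _⟩ => hn hp⟩
  have hOnodup : O.Nodup := (by decide : pvPrimary.Nodup).filter _
  have hRnodup : R.Nodup := hSnodup.filter _
  have hsortR := PySem.List.sorted_perm R (fun x => x) false
  -- permutation: O ++ sorted R is a rearrangement of S
  have hperm : (O ++ PySem.List.sorted R (fun x => x) false).Perm S := by
    have h1 : O.Perm (S.filter (fun c => decide (c ∈ pvPrimary))) := by
      refine (List.perm_ext_iff_of_nodup hOnodup (hSnodup.filter _)).mpr ?_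
      intro a
      simp [hmemO, List.mem_filter, and_comm]
    have h2 : R.Perm (S.filter (fun c => !decide (c ∈ pvPrimary))) := by
      refine (List.perm_ext_iff_of_nodup hRnodup (hSnodup.filter _)).mpr ?_
      intro a
      simp [hmemR, List.mem_filter]
    exact ((h1.append (hsortR.trans h2)).trans
      (List.filter_append_perm (fun c => decide (c ∈ pvPrimary)) S))
  -- strict increase of the (rank, code) lexicographic key along O ++ sorted R
  have hpair : (O ++ PySem.List.sorted R (fun x => x) false).Pairwise
      (fun a b => toLex (pvRank a, a) < toLex (pvRank b, b)) := by
    rw [List.pairwise_append]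
    refine ⟨?_, ?_, ?_⟩
    · exact (pvPrimary_pairwise.sublist List.filter_sublist).imp
        (fun h => Prod.Lex.toLex_lt_toLex.mpr (Or.inl h))
    · have hle : (PySem.List.sorted R (fun x => x) false).Pairwise (fun a b => a ≤ b) :=
        PySem.List.sorted_pairwise R (fun x => x)
      have hne : (PySem.List.sorted R (fun x => x) false).Pairwise (fun a b => a ≠ b) :=
        (hsortR.nodup_iff.mpr hRnodup)
      refine (hle.and hne).imp_of_mem ?_
      intro a b ha hb h
      have haR : a ∉ pvPrimary := ((hmemR a).mp ((PySem.List.mem_sorted _ _ _ _).mp ha)).2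
      have hbR : b ∉ pvPrimary := ((hmemR b).mp ((PySem.List.mem_sorted _ _ _ _).mp hb)).2
      refine Prod.Lex.toLex_lt_toLex.mpr (Or.inr ?_)
      exact ⟨(pvRank_of_not_mem a haR).trans (pvRank_of_not_mem b hbR).symm,
        lt_of_le_of_ne h.1 h.2⟩
    · intro a ha b hb
      have ha' : a ∈ pvPrimary := ((hmemO a).mp ha).1
      have hb' : b ∉ pvPrimary := ((hmemR b).mp ((PySem.List.mem_sorted _ _ _ _).mp hb)).2
      refine Prod.Lex.toLex_lt_toLex.mpr (Or.inl ?_)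
      rw [pvRank_of_not_mem b hb']
      exact pvRank_lt_of_mem a ha'
  exact (pvSorted2_eq_of_perm_of_pairwise_lt S _ pvRank hperm hpair).symm
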